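-- pv_equiv track=rewrite | github.com/YinRuiJuan/yaya_S-AES | S_AES_16bits.py | bit_to_convert
-- ===== SOURCE A (Python) =====
-- def two_to_ten(binary):
--     decimal=0
--     binary_list = [int(x) for x in str(binary)[::-1]]
--     for i in range(len(binary_list)):
--         decimal += binary_list[i] * 2**i
--     return decimal
--
-- def bit_to_convert(fenzu):
--     result = ""
--     for i in fenzu:
--         # 将字符转换为8位ASCII编码，并使用zfill方法填充到8位
--         i_1=i[0:8]
--         i_2=i[8:16]
--         ascii_code_1 = chr(two_to_ten(i_1))
--         ascii_code_2 = chr(two_to_ten(i_2))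
--         ascii_code=ascii_code_1+ascii_code_2
--         result += ascii_code
--     return result
-- ===== SOURCE B (Python) =====
-- def bit_to_convert(fenzu):
--     # Horner-style left-to-right accumulation (v = 2*v + bit) over each 8-bit
--     # chunk: no string reversal, no powers of two, one join at the end.
--     chars = []
--     for grp in fenzu:
--         for chunk in (grp[0:8], grp[8:16]):
--             v = 0
--             for ch in chunk:
--                 v = 2 * v + int(ch)
--             chars.append(chr(v))
--     return "".join(chars)
-- ===== Notes on version B (the rewrite author's own statement) =====
-- stated objective: simpler
-- what changed: Replaces the reverse-the-string/positional 2**i summation helper two_to_ten and string concatenation with a single left-to-right Horner accumulation (v = 2*v + digit) per 8-bit chunk and one final join.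
import Mathlib
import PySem

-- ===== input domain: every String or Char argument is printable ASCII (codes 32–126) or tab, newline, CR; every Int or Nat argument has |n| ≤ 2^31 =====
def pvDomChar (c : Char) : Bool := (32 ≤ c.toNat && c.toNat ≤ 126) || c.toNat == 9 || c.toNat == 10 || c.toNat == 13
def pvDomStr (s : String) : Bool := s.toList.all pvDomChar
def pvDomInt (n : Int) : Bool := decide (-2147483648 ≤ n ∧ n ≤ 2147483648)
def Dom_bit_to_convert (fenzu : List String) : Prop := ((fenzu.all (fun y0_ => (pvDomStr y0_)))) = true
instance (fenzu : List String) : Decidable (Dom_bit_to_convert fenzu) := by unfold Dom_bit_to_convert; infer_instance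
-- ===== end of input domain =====

-- B replaces the reverse-and-sum-powers helper two_to_ten with a left-to-right
-- Horner accumulation per 8-bit chunk and a single final join (objective: simpler).

-- ===== PORT A =====
-- int(x) on a one-character string; .getD 0 is unreachable under Pre_ (Python A raises there)
def pvIntOfChar (x : Char) : Int := (PySem.Int.ofStr? (String.ofList [x])).getD 0

def two_to_ten (binary : String) : Int :=
  let binary_list : List Int := (binary.toList.reverse).map (fun x => pvIntOfChar x)
  (List.range binary_list.length).foldl
    (fun decimal i => decimal + binary_list.getD i 0 * 2 ^ i) 0

def bit_to_convert (fenzu : List String) : String :=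
  fenzu.foldl (fun result i =>
    let i_1 := String.ofList (PySem.List.slice i.toList (some 0) (some 8))
    let i_2 := String.ofList (PySem.List.slice i.toList (some 8) (some 16))
    let ascii_code_1 := Char.ofNat (two_to_ten i_1).toNat
    let ascii_code_2 := Char.ofNat (two_to_ten i_2).toNat
    let ascii_code := String.ofList [ascii_code_1] ++ String.ofList [ascii_code_2]
    result ++ ascii_code) ""

-- ===== PORT B =====
-- chr of the Horner value of one chunk (int(ch) as in Source B; .getD 0 unreachable under Pre_)
def pvChunkChar (chunk : List Char) : Char :=
  Char.ofNat (chunk.foldl (fun v ch => 2 * v + (PySem.Int.ofStr? (String.ofList [ch])).getD 0) 0).toNat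

def bit_to_convert_alt (fenzu : List String) : String :=
  String.ofList (fenzu.foldl (fun chars grp =>
    chars ++ [pvChunkChar (PySem.List.slice grp.toList (some 0) (some 8)),
              pvChunkChar (PySem.List.slice grp.toList (some 8) (some 16))]) [])

-- ===== PRECONDITION & SPEC =====
-- Pre_ admits exactly the inputs where Python A returns: int(x) is applied to each
-- character of i[0:8] and i[8:16] (i.e. the first 16 characters) and raises
-- ValueError on any non-digit character there (B raises at the same inputs).
def Pre_bit_to_convert (fenzu : List String) : Prop :=
  (fenzu.all (fun s => (s.toList.take 16).all Char.isDigit)) = true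
instance (fenzu : List String) : Decidable (Pre_bit_to_convert fenzu) := by
  unfold Pre_bit_to_convert; infer_instance
def pvWitness_bit_to_convert : List String := ["0100100001101001"]

def Spec_bit_to_convert (fenzu : List String) (out : String) : Prop := out = bit_to_convert_alt fenzu
instance (fenzu : List String) (out : String) : Decidable (Spec_bit_to_convert fenzu out) := by unfold Spec_bit_to_convert; infer_instance

-- ===== CLAIM (what is proved, stated in full; the proofs are below) =====
def Claim_equal_bit_to_convert : Prop := ∀ (fenzu : List String), Dom_bit_to_convert fenzu → Pre_bit_to_convert fenzu → Spec_bit_to_convert fenzu (bit_to_convert fenzu)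

-- ===== LEMMAS AND PROOFS =====

-- Horner fold with an arbitrary initial accumulator
theorem pv_horner_init (t : List Char) (a : Int) :
    t.foldl (fun v ch => 2 * v + (PySem.Int.ofStr? (String.ofList [ch])).getD 0) a
      = a * 2 ^ t.length
        + t.foldl (fun v ch => 2 * v + (PySem.Int.ofStr? (String.ofList [ch])).getD 0) 0 := by
  induction t generalizing a with
  | nil => simp
  | cons c t ih =>
      simp only [List.foldl_cons, List.length_cons]
      rw [ih (2 * a + _), ih (2 * 0 + _)]
      ring

-- A's reversed positional sum equals B's Horner fold, on any character list
theorem pv_two_to_ten_eq (l : List Char) :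
    two_to_ten (String.ofList l)
      = l.foldl (fun v ch => 2 * v + (PySem.Int.ofStr? (String.ofList [ch])).getD 0) 0 := by
  induction l with
  | nil => simp [two_to_ten]
  | cons c t ih =>
      simp only [two_to_ten, String.toList_ofList] at ih ⊢
      rw [show ((c :: t).reverse).map (fun x => pvIntOfChar x)
            = (t.reverse).map (fun x => pvIntOfChar x) ++ [pvIntOfChar c] by simp]
      set r : List Int := (t.reverse).map (fun x => pvIntOfChar x) with hr
      rw [show (r ++ [pvIntOfChar c]).length = r.length + 1 by simp,
          List.range_succ, List.foldl_append]
      have hcong : (List.range r.length).foldl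
            (fun decimal i => decimal + (r ++ [pvIntOfChar c]).getD i 0 * 2 ^ i) 0
          = (List.range r.length).foldl
            (fun decimal i => decimal + r.getD i 0 * 2 ^ i) 0 := by
        apply PySem.List.foldl_congr_mem
        intro a i hi
        rw [List.getD_append _ _ _ _ (List.mem_range.mp hi)]
      have hlast : (r ++ [pvIntOfChar c]).getD r.length 0 = pvIntOfChar c := by
        rw [List.getD_append_right _ _ _ _ (le_refl _)]
        simp
      have hlen : r.length = t.length := by simp [hr]
      simp only [List.foldl_cons, List.foldl_nil]
      rw [hcong, hlast, ih,
          pv_horner_init t (2 * 0 + (PySem.Int.ofStr? (String.ofList [c])).getD 0), hlen]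
      simp only [pvIntOfChar]
      ring

-- the two folds build the same character list, for any pair of accumulators
theorem pv_fold_toList (fenzu : List String) (accA : String) (accB : List Char)
    (h : accA.toList = accB) :
    (fenzu.foldl (fun result i =>
        let i_1 := String.ofList (PySem.List.slice i.toList (some 0) (some 8))
        let i_2 := String.ofList (PySem.List.slice i.toList (some 8) (some 16))
        let ascii_code_1 := Char.ofNat (two_to_ten i_1).toNat
        let ascii_code_2 := Char.ofNat (two_to_ten i_2).toNat
        let ascii_code := String.ofList [ascii_code_1] ++ String.ofList [ascii_code_2]
        result ++ ascii_code) accA).toList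
      = fenzu.foldl (fun chars grp =>
          chars ++ [pvChunkChar (PySem.List.slice grp.toList (some 0) (some 8)),
                    pvChunkChar (PySem.List.slice grp.toList (some 8) (some 16))]) accB := by
  induction fenzu generalizing accA accB with
  | nil => simpa using h
  | cons i t ih =>
      simp only [List.foldl_cons]
      apply ih
      rw [String.toList_append, String.toList_append, String.toList_ofList,
          String.toList_ofList, h]
      rw [show Char.ofNat (two_to_ten (String.ofList (PySem.List.slice i.toList (some 0) (some 8)))).toNat
            = pvChunkChar (PySem.List.slice i.toList (some 0) (some 8)) by
            rw [pvChunkChar, pv_two_to_ten_eq],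
          show Char.ofNat (two_to_ten (String.ofList (PySem.List.slice i.toList (some 8) (some 16)))).toNat
            = pvChunkChar (PySem.List.slice i.toList (some 8) (some 16)) by
            rw [pvChunkChar, pv_two_to_ten_eq]]
      simp

-- ===== VERDICT (by name: the statement is the Claim_ definition above) =====
theorem bit_to_convert_spec : Claim_equal_bit_to_convert := by
  intro fenzu _ _
  show bit_to_convert fenzu = bit_to_convert_alt fenzu
  apply String.toList_inj.mp
  unfold bit_to_convert bit_to_convert_alt
  rw [String.toList_ofList]
  exact pv_fold_toList fenzu "" [] rfl
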